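-- pv_equiv track=rewrite | github.com/AMARNATH002/Alternating-Disk-Ordering | app.py | solve_disks
-- ===== SOURCE A (Python) =====
-- def solve_disks(n, pattern):
--     size = 2 * n
--
--     # Generate initial disk sequence based on pattern
--     if pattern == "LD":
--         disks = ['L' if i % 2 == 0 else 'D' for i in range(size)]
--     else:  # "DL"
--         disks = ['D' if i % 2 == 0 else 'L' for i in range(size)]
--
--     initial_disks = disks.copy()
--     moves = 0
--     is_sorted = False
--
--     while not is_sorted:
--         is_sorted = True
--         for i in range(size - 1):
--             if disks[i] == 'D' and disks[i + 1] == 'L':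
--                 disks[i], disks[i + 1] = disks[i + 1], disks[i]
--                 moves += 1
--                 is_sorted = False
--
--     return initial_disks, disks, moves
-- ===== SOURCE B (Python) =====
-- def solve_disks(n, pattern):
--     # Closed form: the bubble process on an alternating row ends with all L's
--     # before all D's, and the number of swaps is the inversion count.
--     if n <= 0:
--         return [], [], 0
--     if pattern == "LD":
--         initial = ['L', 'D'] * n
--         moves = n * (n - 1) // 2
--     else:  # "DL"
--         initial = ['D', 'L'] * n
--         moves = n * (n + 1) // 2
--     return initial, ['L'] * n + ['D'] * n, moves
-- ===== Notes on version B (the rewrite author's own statement) =====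
-- stated objective: faster
-- what changed: B replaces A's repeated bubble-sort passes over the 2n-disk row by directly building the initial and sorted rows and computing the swap count in closed form (n*(n-1)//2 for 'LD', n*(n+1)//2 otherwise), since the number of adjacent swaps equals the inversion count of the alternating pattern.
import Mathlib
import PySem

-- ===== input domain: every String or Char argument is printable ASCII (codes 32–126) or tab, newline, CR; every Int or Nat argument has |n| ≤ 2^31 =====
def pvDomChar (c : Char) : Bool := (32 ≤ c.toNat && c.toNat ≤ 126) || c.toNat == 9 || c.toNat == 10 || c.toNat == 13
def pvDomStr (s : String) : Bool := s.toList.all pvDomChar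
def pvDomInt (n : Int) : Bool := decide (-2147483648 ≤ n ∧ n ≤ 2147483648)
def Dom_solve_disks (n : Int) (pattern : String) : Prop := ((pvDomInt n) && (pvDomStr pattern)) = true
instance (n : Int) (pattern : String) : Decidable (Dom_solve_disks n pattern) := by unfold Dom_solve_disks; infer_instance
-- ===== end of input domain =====

-- B replaces A's repeated bubble passes by a closed form (asymptotic speed-up).

-- ===== PORT A =====
-- A's inner 'for i in range(size-1)' sweep mutates disks in place; ported as the
-- structural recursion over the list performing the same comparisons and adjacent
-- swaps in the same left-to-right order (after a swap the moved 'D' is carried on).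
def pvSweep : List String → List String × Int
  | [] => ([], 0)
  | [x] => ([x], 0)
  | a :: b :: t =>
    if a == "D" && b == "L" then
      let r := pvSweep (a :: t)
      (b :: r.1, r.2 + 1)
    else
      let r := pvSweep (b :: t)
      (a :: r.1, r.2)

-- A's 'while not is_sorted' loop; fuel only makes the recursion total (the proof
-- below shows the loop always exits well within this fuel).
def pvLoop : Nat → List String → Int → List String × Int
  | 0, d, m => (d, m)
  | fuel + 1, d, m =>
    let s := pvSweep d
    if s.2 == 0 then (s.1, m) else pvLoop fuel s.1 (m + s.2)

def solve_disks (n : Int) (pattern : String) : List String × List String × Int :=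
  let size := 2 * n
  let disks :=
    if pattern == "LD" then
      (PySem.List.pyRange 0 size 1).map (fun i => if PySem.Int.mod i 2 == 0 then "L" else "D")
    else
      (PySem.List.pyRange 0 size 1).map (fun i => if PySem.Int.mod i 2 == 0 then "D" else "L")
  let r := pvLoop (size.toNat + 2) disks 0
  (disks, r.1, r.2)

-- ===== PORT B =====
def solve_disks_alt (n : Int) (pattern : String) : List String × List String × Int :=
  if n ≤ 0 then ([], [], 0)
  else
    let k := n.toNat
    if pattern == "LD" then
      ((List.replicate k ["L", "D"]).flatten,
       List.replicate k "L" ++ List.replicate k "D",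
       PySem.Int.floordiv (n * (n - 1)) 2)
    else
      ((List.replicate k ["D", "L"]).flatten,
       List.replicate k "L" ++ List.replicate k "D",
       PySem.Int.floordiv (n * (n + 1)) 2)

-- ===== PRECONDITION & SPEC =====
def Spec_solve_disks (n : Int) (pattern : String) (out : List String × List String × Int) : Prop := out = solve_disks_alt n pattern
instance (n : Int) (pattern : String) (out : List String × List String × Int) : Decidable (Spec_solve_disks n pattern out) := by unfold Spec_solve_disks; infer_instance

-- ===== CLAIM (what is proved, stated in full; the proofs are below) =====
def Claim_equal_solve_disks : Prop := ∀ (n : Int) (pattern : String), Dom_solve_disks n pattern → Spec_solve_disks n pattern (solve_disks n pattern)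

-- ===== LEMMAS AND PROOFS =====

-- 'D' 'L' pairs, 'L…L' prefix and 'D…D' suffix building blocks of the loop's states
def pvDL : Nat → List String
  | 0 => []
  | m + 1 => "D" :: "L" :: pvDL m

def pvSt (a m b : Nat) : List String :=
  List.replicate a "L" ++ pvDL m ++ List.replicate b "D"

def pvTri : Nat → Int
  | 0 => 0
  | j + 1 => pvTri j + (j + 1)

theorem pvSweep_L (s : List String) :
    pvSweep ("L" :: s) = ("L" :: (pvSweep s).1, (pvSweep s).2) := by
  cases s with
  | nil => simp [pvSweep]
  | cons b t => simp [pvSweep]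

theorem pvSweep_repL (a : Nat) (s : List String) :
    pvSweep (List.replicate a "L" ++ s)
      = (List.replicate a "L" ++ (pvSweep s).1, (pvSweep s).2) := by
  induction a with
  | zero => simp
  | succ a ih => simp [List.replicate_succ, pvSweep_L, ih]

theorem pvSweep_repD (b : Nat) :
    pvSweep ("D" :: List.replicate b "D") = ("D" :: List.replicate b "D", 0) := by
  induction b with
  | zero => simp [pvSweep]
  | succ b ih => simp [List.replicate_succ, pvSweep, ih]

theorem pvSweep_DL (t : List String) :
    pvSweep ("D" :: "L" :: t)
      = ("L" :: (pvSweep ("D" :: t)).1, (pvSweep ("D" :: t)).2 + 1) := by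
  rw [pvSweep]
  simp

theorem pvSweep_DD (t : List String) :
    pvSweep ("D" :: "D" :: t)
      = ("D" :: (pvSweep ("D" :: t)).1, (pvSweep ("D" :: t)).2) := by
  rw [pvSweep]
  simp

theorem pvSweep_dl (m : Nat) : ∀ b : Nat,
    pvSweep (pvDL (m + 1) ++ List.replicate b "D")
      = ("L" :: pvDL m ++ List.replicate (b + 1) "D", (m : Int) + 1) := by
  induction m with
  | zero =>
    intro b
    simp only [pvDL, List.cons_append, List.nil_append]
    rw [pvSweep_DL, pvSweep_repD]
    simp [List.replicate_succ]
  | succ m ih =>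
    intro b
    have h1 : pvDL (m + 1 + 1) ++ List.replicate b "D"
        = "D" :: "L" :: "D" :: "L" :: (pvDL m ++ List.replicate b "D") := by
      simp [pvDL]
    have h2 : "D" :: "L" :: (pvDL m ++ List.replicate b "D")
        = pvDL (m + 1) ++ List.replicate b "D" := by
      simp [pvDL]
    rw [h1, pvSweep_DL, pvSweep_DD, h2, ih b]
    refine Prod.ext ?_ ?_
    · simp [pvDL]
    · push_cast
      ring

theorem pvSweep_st_succ (a m b : Nat) :
    pvSweep (pvSt a (m + 1) b) = (pvSt (a + 1) m (b + 1), (m : Int) + 1) := by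
  unfold pvSt
  rw [List.append_assoc, pvSweep_repL, pvSweep_dl m b]
  refine Prod.ext ?_ rfl
  show List.replicate a "L" ++ "L" :: (pvDL m ++ List.replicate (b + 1) "D")
      = List.replicate (a + 1) "L" ++ pvDL m ++ List.replicate (b + 1) "D"
  rw [List.append_cons, ← List.replicate_succ']
  simp

theorem pvSweep_st_zero (a b : Nat) :
    pvSweep (pvSt a 0 b) = (pvSt a 0 b, 0) := by
  unfold pvSt
  cases b with
  | zero => simpa [pvDL, pvSweep] using pvSweep_repL a []
  | succ b =>
    simp only [pvDL, List.append_nil, List.replicate_succ]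
    rw [pvSweep_repL, pvSweep_repD]

theorem pvLoop_st (j : Nat) : ∀ (fuel a b : Nat) (m : Int), j + 1 ≤ fuel →
    pvLoop fuel (pvSt a j b) m = (pvSt (a + j) 0 (b + j), m + pvTri j) := by
  induction j with
  | zero =>
    intro fuel a b m hf
    obtain ⟨f, rfl⟩ : ∃ f, fuel = f + 1 := ⟨fuel - 1, by omega⟩
    simp only [pvLoop, pvSweep_st_zero]
    simp [pvTri]
  | succ j ih =>
    intro fuel a b m hf
    obtain ⟨f, rfl⟩ : ∃ f, fuel = f + 1 := ⟨fuel - 1, by omega⟩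
    have hne : (((j : Int) + 1) == (0 : Int)) = false := by
      rw [beq_eq_false_iff_ne]
      omega
    simp only [pvLoop, pvSweep_st_succ, hne]
    rw [if_neg (by simp)]
    rw [ih f (a + 1) (b + 1) (m + ((j : Int) + 1)) (by omega)]
    have e1 : a + 1 + j = a + (j + 1) := by omega
    have e2 : b + 1 + j = b + (j + 1) := by omega
    rw [e1, e2]
    refine Prod.ext rfl ?_
    show m + ((j : Int) + 1) + pvTri j = m + pvTri (j + 1)
    rw [pvTri]
    ring

-- the two initial comprehensions
def pvLDlist : Nat → List String
  | 0 => []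
  | m + 1 => "L" :: "D" :: pvLDlist m

theorem pvLDlist_append (k : Nat) : pvLDlist (k + 1) = pvLDlist k ++ ["L", "D"] := by
  induction k with
  | zero => simp [pvLDlist]
  | succ k ih =>
    conv_lhs => rw [show pvLDlist (k + 1 + 1) = "L" :: "D" :: pvLDlist (k + 1) from rfl, ih]
    simp [pvLDlist]

theorem pvDL_append (k : Nat) : pvDL (k + 1) = pvDL k ++ ["D", "L"] := by
  induction k with
  | zero => simp [pvDL]
  | succ k ih =>
    conv_lhs => rw [show pvDL (k + 1 + 1) = "D" :: "L" :: pvDL (k + 1) from rfl, ih]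
    simp [pvDL]

theorem pvRange_two (k : Nat) :
    PySem.List.pyRange 0 (2 * ((k : Int) + 1)) 1
      = PySem.List.pyRange 0 (2 * (k : Int)) 1 ++ [2 * (k : Int), 2 * (k : Int) + 1] := by
  have h1 : 2 * ((k : Int) + 1) = (2 * (k : Int) + 1) + 1 := by ring
  rw [h1, PySem.List.pyRange_one_succ_right (by omega),
      PySem.List.pyRange_one_succ_right (by omega)]
  simp

theorem pvInit_LD (k : Nat) :
    (PySem.List.pyRange 0 (2 * (k : Int)) 1).map
        (fun i => if PySem.Int.mod i 2 == 0 then "L" else "D") = pvLDlist k := by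
  induction k with
  | zero => simp [PySem.List.pyRange_one_eq_nil, pvLDlist]
  | succ k ih =>
    push_cast
    rw [pvRange_two k]
    simp only [List.map_append, ih, List.map_cons, List.map_nil]
    rw [pvLDlist_append]
    simp

theorem pvInit_DL (k : Nat) :
    (PySem.List.pyRange 0 (2 * (k : Int)) 1).map
        (fun i => if PySem.Int.mod i 2 == 0 then "D" else "L") = pvDL k := by
  induction k with
  | zero => simp [PySem.List.pyRange_one_eq_nil, pvDL]
  | succ k ih =>
    push_cast
    rw [pvRange_two k]
    simp only [List.map_append, ih, List.map_cons, List.map_nil]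
    rw [pvDL_append]
    simp

theorem pvD_LDlist (j : Nat) : "D" :: pvLDlist j = pvDL j ++ ["D"] := by
  induction j with
  | zero => simp [pvLDlist, pvDL]
  | succ j ih =>
    show "D" :: "L" :: "D" :: pvLDlist j = ("D" :: "L" :: pvDL j) ++ ["D"]
    rw [ih]
    simp

theorem pvLDlist_eq_st (j : Nat) : pvLDlist (j + 1) = pvSt 1 j 1 := by
  show "L" :: "D" :: pvLDlist j = pvSt 1 j 1
  rw [pvD_LDlist]
  simp [pvSt]

theorem pvDL_eq_st (k : Nat) : pvDL k = pvSt 0 k 0 := by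
  simp [pvSt]

theorem pvFlatten_LD (k : Nat) : (List.replicate k (["L", "D"] : List String)).flatten = pvLDlist k := by
  induction k with
  | zero => simp [pvLDlist]
  | succ k ih => simp [List.replicate_succ, pvLDlist, ih]

theorem pvFlatten_DL (k : Nat) : (List.replicate k (["D", "L"] : List String)).flatten = pvDL k := by
  induction k with
  | zero => simp [pvDL]
  | succ k ih => simp [List.replicate_succ, pvDL, ih]

theorem pvTri_closed (j : Nat) : pvTri j = ((j : Int) * (j + 1)) / 2 := by
  induction j with
  | zero => simp [pvTri]
  | succ j ih =>
    rw [pvTri, ih]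
    have h1 : ((j : Int) + 1) * ((j : Int) + 1 + 1) = (j : Int) * ((j : Int) + 1) + 2 * ((j : Int) + 1) := by
      ring
    have h2 : (2 : Int) ∣ (j : Int) * ((j : Int) + 1) := (Int.even_mul_succ_self (j : Int)).two_dvd
    push_cast
    omega

-- ===== VERDICT (by name: the statement is the Claim_ definition above) =====
theorem solve_disks_spec : Claim_equal_solve_disks := by
  intro n pattern _
  unfold Spec_solve_disks solve_disks solve_disks_alt
  by_cases hn : n ≤ 0
  · have hr : PySem.List.pyRange 0 (2 * n) 1 = [] :=
      PySem.List.pyRange_one_eq_nil (by omega)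
    simp [hr, pvLoop, pvSweep, hn]
  · obtain ⟨j, hk⟩ : ∃ j, n.toNat = j + 1 := ⟨n.toNat - 1, by omega⟩
    have hcast : (2 * n) = 2 * ((n.toNat : Int)) := by omega
    have hfuel : j + 2 ≤ (2 * n).toNat + 2 := by omega
    have hnle : ¬ (n ≤ 0) := by omega
    have hj : n = (j : Int) + 1 := by omega
    by_cases hp : (pattern == "LD") = true
    · simp only [hp, if_true, hnle, if_false, hcast, pvInit_LD, hk]
      rw [pvLDlist_eq_st j, pvLoop_st j _ 1 1 0 (by omega)]
      simp only [Prod.mk.injEq]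
      refine ⟨?_, ?_, ?_⟩
      · rw [pvFlatten_LD]
        exact (pvLDlist_eq_st j).symm
      · simp [pvSt, pvDL, Nat.add_comm]
      · rw [PySem.Int.floordiv_eq_ediv_of_pos (by omega), pvTri_closed]
        have hm : n * (n - 1) = (j : Int) * ((j : Int) + 1) := by rw [hj]; ring
        rw [hm]
        omega
    · simp only [hp, if_false, hnle, hcast, pvInit_DL, hk, Bool.false_eq_true]
      rw [pvDL_eq_st (j + 1), pvLoop_st (j + 1) _ 0 0 0 (by omega)]
      simp only [Prod.mk.injEq]
      refine ⟨?_, ?_, ?_⟩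
      · rw [pvFlatten_DL]
        exact (pvDL_eq_st (j + 1)).symm
      · simp [pvSt, pvDL]
      · rw [PySem.Int.floordiv_eq_ediv_of_pos (by omega), pvTri_closed]
        have hm : n * (n + 1) = ((j + 1 : Nat) : Int) * (((j + 1 : Nat) : Int) + 1) := by
          rw [hj]; push_cast; ring
        rw [hm]
        omega
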